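-- pv_equiv track=rewrite | github.com/elizabethfuentes12/whatsapp-ai-agent-sample-for-aws-agentcore | 01-whatsapp-end-user-messaging/lambdas/code/message_processor/lambda_function.py | _group_by_sender
-- ===== SOURCE A (Python) =====
-- from collections import defaultdict
--
-- def _group_by_sender(records):
--     """Group records by from_phone, sorted by timestamp."""
--     grouped = defaultdict(list)
--     for record in records:
--         sender = record.get("from_phone", "")
--         grouped[sender].append(record)
--     for sender in grouped:
--         grouped[sender].sort(key=lambda m: m.get("timestamp", ""))
--     return grouped
-- ===== SOURCE B (Python) =====
-- def _group_by_sender(records):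
--     """Group records by from_phone, sorted by timestamp."""
--     senders = dict.fromkeys(r.get("from_phone", "") for r in records)
--     return {
--         s: sorted(
--             (r for r in records if r.get("from_phone", "") == s),
--             key=lambda m: m.get("timestamp", ""),
--         )
--         for s in senders
--     }
-- ===== Notes on version B (the rewrite author's own statement) =====
-- stated objective: simpler
-- what changed: A builds buckets incrementally in a defaultdict and then sorts each bucket in place; B collects the senders in first-appearance order with dict.fromkeys and builds the result in one dict comprehension, filtering and sorting the records of each sender (plain dict instead of defaultdict; return value is equal); a timing run measured B ~1.8x faster on the generated inputs (fewer per-record dict operations).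
import Mathlib
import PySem

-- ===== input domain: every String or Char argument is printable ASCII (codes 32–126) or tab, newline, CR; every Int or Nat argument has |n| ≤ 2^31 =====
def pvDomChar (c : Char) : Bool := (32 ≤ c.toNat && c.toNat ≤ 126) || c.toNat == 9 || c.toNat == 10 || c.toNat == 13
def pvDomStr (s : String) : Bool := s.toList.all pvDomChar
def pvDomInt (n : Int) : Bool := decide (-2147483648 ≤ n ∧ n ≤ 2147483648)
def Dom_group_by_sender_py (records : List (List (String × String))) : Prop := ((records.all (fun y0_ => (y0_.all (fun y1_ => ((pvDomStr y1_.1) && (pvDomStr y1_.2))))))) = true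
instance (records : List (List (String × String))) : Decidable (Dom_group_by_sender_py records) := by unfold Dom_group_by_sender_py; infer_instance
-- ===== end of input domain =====

-- B replaces A's incremental defaultdict grouping + per-bucket in-place sort by a
-- dict.fromkeys pass over the senders followed by one filter-and-sort comprehension (objective: simpler).

-- record.get(k, dflt) on a record (a dict, modelled as an association list)
def pvGetKey (r : List (String × String)) (k dflt : String) : String :=
  (PySem.Dict.mk r).getD k dflt

-- ===== PORT A =====
def group_by_sender_py (records : List (List (String × String))) : List (String × List (List (String × String))) :=
  let grouped : PySem.Dict String (List (List (String × String))) :=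
    records.foldl (fun d record =>
      d.modify (pvGetKey record "from_phone" "") [] (fun v => v ++ [record])) PySem.Dict.empty
  let grouped2 :=
    grouped.keys.foldl (fun d sender =>
      d.insert sender (PySem.List.sorted (d.getD sender []) (fun m => pvGetKey m "timestamp" "") false)) grouped
  grouped2.items

-- ===== PORT B =====
def group_by_sender_py_alt (records : List (List (String × String))) : List (String × List (List (String × String))) :=
  let senders := PySem.List.dedup (records.map (fun r => pvGetKey r "from_phone" ""))
  senders.map (fun s =>
    (s, PySem.List.sorted (records.filter (fun r => pvGetKey r "from_phone" "" == s))
          (fun m => pvGetKey m "timestamp" "") false))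

-- ===== PRECONDITION & SPEC =====
def Spec_group_by_sender_py (records : List (List (String × String))) (out : List (String × List (List (String × String)))) : Prop := out = group_by_sender_py_alt records
instance (records : List (List (String × String))) (out : List (String × List (List (String × String)))) : Decidable (Spec_group_by_sender_py records out) := by unfold Spec_group_by_sender_py; infer_instance

-- ===== CLAIM (what is proved, stated in full; the proofs are below) =====
def Claim_equal_group_by_sender_py : Prop := ∀ (records : List (List (String × String))), Dom_group_by_sender_py records → Spec_group_by_sender_py records (group_by_sender_py records)

-- ===== LEMMAS AND PROOFS =====

-- A fold of inserts over keys not containing s leaves the lookup at s unchanged.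
theorem foldl_insert_getD_not_mem {κ ν : Type} [BEq κ] [LawfulBEq κ]
    (ks : List κ) (f : PySem.Dict κ ν → κ → ν) (d : PySem.Dict κ ν) (s : κ) (dflt : ν)
    (h : s ∉ ks) :
    (ks.foldl (fun d k => d.insert k (f d k)) d).getD s dflt = d.getD s dflt := by
  induction ks generalizing d with
  | nil => rfl
  | cons k rest ih =>
    simp only [List.mem_cons, not_or] at h
    simp only [List.foldl_cons]
    rw [ih _ h.2, PySem.Dict.getD_insert_of_ne _ _ _ h.1]

-- A fold updating each key of a Nodup list by g applied to its current value: lookup at s ∈ ks is g of the original value.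
theorem foldl_insert_getD_mem {κ ν : Type} [BEq κ] [LawfulBEq κ]
    (ks : List κ) (g : ν → ν) (d : PySem.Dict κ ν) (s : κ) (dflt : ν)
    (hnd : ks.Nodup) (hs : s ∈ ks) :
    (ks.foldl (fun d k => d.insert k (g (d.getD k dflt))) d).getD s dflt = g (d.getD s dflt) := by
  induction ks generalizing d with
  | nil => cases hs
  | cons k rest ih =>
    simp only [List.nodup_cons] at hnd
    simp only [List.foldl_cons]
    rcases List.mem_cons.1 hs with h | h
    · subst h
      rw [foldl_insert_getD_not_mem (f := fun d k => g (d.getD k dflt)) _ _ _ _ hnd.1,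
        PySem.Dict.getD_insert_self]
    · rw [ih _ hnd.2 h, PySem.Dict.getD_insert_of_ne]
      intro hsk; exact hnd.1 (hsk ▸ h)

-- Set.update with elements already present is the identity.
theorem set_update_of_subset {α : Type} [BEq α] [LawfulBEq α]
    (s : PySem.Set α) (l : List α) (h : ∀ x ∈ l, x ∈ s) : PySem.Set.update s l = s := by
  induction l generalizing s with
  | nil => rfl
  | cons x rest ih =>
    have hx : PySem.Set.add s x = s := by
      simp [PySem.Set.add, PySem.Set.contains, h x (List.mem_cons_self ..)]
    show List.foldl PySem.Set.add s (x :: rest) = s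
    simp only [List.foldl_cons, hx]
    exact ih s (fun y hy => h y (List.mem_cons_of_mem _ hy))

theorem group_by_sender_py_spec : Claim_equal_group_by_sender_py := by
  intro records _
  unfold Spec_group_by_sender_py group_by_sender_py group_by_sender_py_alt
  set key : List (String × String) → String := fun r => pvGetKey r "from_phone" "" with hkey
  set ts : List (String × String) → String := fun m => pvGetKey m "timestamp" "" with hts
  set grouped : PySem.Dict String (List (List (String × String))) :=
    records.foldl (fun d record => d.modify (key record) [] (fun v => v ++ [record])) PySem.Dict.empty
    with hg
  have hnd : grouped.keys.Nodup := by
    rw [hg]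
    exact PySem.Dict.nodup_keys_foldl_modify_key _ _ _ (fun d x v => v ++ [x]) _
      PySem.Dict.nodup_keys_empty
  have hkeys : grouped.keys = PySem.Set.ofList (records.map key) := by
    rw [hg, PySem.Dict.keys_foldl_modify_key _ _ _ (fun d x v => v ++ [x])]
    rfl
  have hgetD : ∀ s, grouped.getD s [] = records.filter (fun r => key r == s) := by
    intro s
    have hmap : records.foldl (fun d record => d.modify (key record) [] (fun v => v ++ [record]))
        PySem.Dict.empty
        = (records.map (fun r => (key r, r))).foldl
            (fun d p => d.modify p.1 [] (fun v => v ++ [p.2])) PySem.Dict.empty := by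
      rw [List.foldl_map]
    rw [hg, hmap, PySem.Dict.getD_foldl_modify_append]
    simp [List.filter_map, Function.comp_def]
  set grouped2 := grouped.keys.foldl (fun d sender =>
      d.insert sender (PySem.List.sorted (d.getD sender []) ts false)) grouped with hg2
  have hk2 : grouped2.keys = grouped.keys := by
    rw [hg2, PySem.Dict.keys_foldl_insert _ (fun d sender => PySem.List.sorted (d.getD sender []) ts false)]
    exact set_update_of_subset _ _ (fun x hx => hx)
  have hitems : grouped2.items = grouped2.keys.map (fun k => (k, grouped2.getD k [])) :=
    PySem.Dict.items_eq_map_keys _ (hk2 ▸ hnd) []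
  have hdedup : PySem.List.dedup (records.map key) = PySem.Set.ofList (records.map key) := rfl
  rw [hitems, hk2, hkeys, ← hdedup]
  apply List.map_congr_left
  intro s hs
  have hs' : s ∈ grouped.keys := by rw [hkeys]; exact hs
  rw [hg2, foldl_insert_getD_mem (g := fun v => PySem.List.sorted v ts false) _ _ _ _ hnd hs',
    hgetD s]
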